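-- pv_equiv track=rewrite | github.com/Aranchev/pytest_fundamental | src/_03_list/mex/_06_list_mani.py | min_odd
-- ===== SOURCE A (Python) =====
-- def min_odd(a):
--     c = None
--     c_ = -1
--     for i, x in enumerate(a):
--         if x % 2 != 0:
--             if c is None or x <= c:
--                 c = x
--                 c_ = i
--     if c != None:
--         return c_
--     else:
--         return "No matches"
-- ===== SOURCE B (Python) =====
-- def min_odd(a):
--     odds = [(x, i) for i, x in enumerate(a) if x % 2 != 0]
--     if not odds:
--         return "No matches"
--     m = min(x for x, _ in odds)
--     return max(i for x, i in odds if x == m)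
-- ===== Notes on version B (the rewrite author's own statement) =====
-- stated objective: alternative
-- what changed: Replaced A's single accumulator pass (running minimal odd with its last index) by a collect-then-reduce decomposition: filter the odd (value, index) pairs, take the minimum of the values, then the maximum index among the minimizers.
-- outside the precondition, e.g. on min_odd([2, 4]): A returns 'No matches', B returns 'No matches'
import Mathlib
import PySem

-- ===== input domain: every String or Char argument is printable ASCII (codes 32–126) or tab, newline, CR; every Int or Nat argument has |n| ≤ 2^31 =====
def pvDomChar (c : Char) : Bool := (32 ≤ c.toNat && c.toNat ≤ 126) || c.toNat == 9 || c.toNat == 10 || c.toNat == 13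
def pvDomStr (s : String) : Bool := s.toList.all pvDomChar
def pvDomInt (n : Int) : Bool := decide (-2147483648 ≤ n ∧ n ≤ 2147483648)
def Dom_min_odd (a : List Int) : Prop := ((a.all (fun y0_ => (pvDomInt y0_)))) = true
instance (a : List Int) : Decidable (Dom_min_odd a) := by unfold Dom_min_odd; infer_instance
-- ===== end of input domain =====

-- B replaces A's single accumulator loop by a collect-then-reduce decomposition
-- (filter odd (value,index) pairs, take min of values, then max of minimizing indices);
-- objective: alternative structure, same observable behaviour.

-- ===== PORT A =====
-- A's single pass: state (c, c_) with c = current minimal odd (last-occurrence ties), c_ its index.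
def min_odd (a : List Int) : Int :=
  let st := (PySem.List.enumerate a 0).foldl
    (fun (st : Option Int × Int) (p : Int × Int) =>
      if p.2 % 2 ≠ 0 then
        match st.1 with
        | none => (some p.2, p.1)
        | some c => if p.2 ≤ c then (some p.2, p.1) else st
      else st) (none, -1)
  match st.1 with
  | some _ => st.2
  | none => -1   -- Python A returns the string "No matches" here; excluded by Pre_min_odd

-- ===== PORT B =====
def min_odd_alt (a : List Int) : Int :=
  let odds := ((PySem.List.enumerate a 0).filter (fun p => p.2 % 2 != 0)).map (fun p => (p.2, p.1))
  if odds.isEmpty then -1   -- Python B returns the string "No matches" here; excluded by Pre_min_odd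
  else
    match PySem.List.min? (odds.map (fun p => p.1)) (fun x => x) with
    | none => -1
    | some m =>
      match PySem.List.max? ((odds.filter (fun p => p.1 == m)).map (fun p => p.2)) (fun x => x) with
      | none => -1
      | some j => j

-- ===== PRECONDITION & SPEC =====
-- Pre_ excludes lists with no odd element: there both Pythons return the string "No matches",
-- which is not a value of the declared return type Int.
def Pre_min_odd (a : List Int) : Prop := ∃ x ∈ a, x % 2 ≠ 0
instance (a : List Int) : Decidable (Pre_min_odd a) := by unfold Pre_min_odd; infer_instance
def pvWitness_min_odd : List Int := [4, 7, 3, 3, 8]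

def Spec_min_odd (a : List Int) (out : Int) : Prop := out = min_odd_alt a
instance (a : List Int) (out : Int) : Decidable (Spec_min_odd a out) := by unfold Spec_min_odd; infer_instance

-- ===== CLAIM (what is proved, stated in full; the proofs are below) =====
def Claim_equal_min_odd : Prop := ∀ (a : List Int), Dom_min_odd a → Pre_min_odd a → Spec_min_odd a (min_odd a)

-- ===== LEMMAS AND PROOFS =====

-- proof-side abbreviations
def pvStep (st : Option Int × Int) (p : Int × Int) : Option Int × Int :=
  if p.2 % 2 ≠ 0 then
    match st.1 with
    | none => (some p.2, p.1)
    | some c => if p.2 ≤ c then (some p.2, p.1) else st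
  else st

def pvOdds (xs : List Int) : List (Int × Int) :=
  ((PySem.List.enumerate xs 0).filter (fun p => p.2 % 2 != 0)).map (fun p => (p.2, p.1))

def pvAns (odds : List (Int × Int)) : Int :=
  match PySem.List.min? (odds.map (fun p => p.1)) (fun x => x) with
  | none => -1
  | some m =>
    match PySem.List.max? ((odds.filter (fun p => p.1 == m)).map (fun p => p.2)) (fun x => x) with
    | none => -1
    | some j => j

theorem pv_min?_append_singleton (l : List Int) (v : Int) :
    PySem.List.min? (l ++ [v]) (fun x => x) =
      some (match PySem.List.min? l (fun x => x) with | none => v | some m => min m v) := by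
  cases l with
  | nil => simp [PySem.List.min?]
  | cons x t =>
      rw [List.cons_append, PySem.List.min?_id_cons, PySem.List.min?_id_cons]
      simp [List.foldl_append]

theorem pv_max?_append_singleton (l : List Int) (v : Int) :
    PySem.List.max? (l ++ [v]) (fun x => x) =
      some (match PySem.List.max? l (fun x => x) with | none => v | some m => max m v) := by
  cases l with
  | nil => simp [PySem.List.max?]
  | cons x t =>
      rw [List.cons_append, PySem.List.max?_id_cons, PySem.List.max?_id_cons]
      simp [List.foldl_append]

theorem pvOdds_append (xs : List Int) (x : Int) :
    pvOdds (xs ++ [x]) =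
      pvOdds xs ++ (if x % 2 ≠ 0 then [(x, (xs.length : Int))] else []) := by
  unfold pvOdds
  rw [PySem.List.enumerate_append]
  simp only [List.filter_append, List.map_append]
  congr 1
  by_cases h : x % 2 ≠ 0 <;>
    simp [PySem.List.enumerate_cons, PySem.List.enumerate_nil, List.filter, h]

theorem pvOdds_index_lt (xs : List Int) : ∀ p ∈ pvOdds xs, p.2 < (xs.length : Int) := by
  intro p hp
  unfold pvOdds at hp
  simp only [List.mem_map, List.mem_filter] at hp
  obtain ⟨q, ⟨hq, _⟩, rfl⟩ := hp
  rw [PySem.List.mem_enumerate_iff] at hq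
  obtain ⟨k, hk, rfl⟩ := hq
  simpa using hk

theorem pv_fold_char (xs : List Int) :
    (PySem.List.enumerate xs 0).foldl pvStep (none, -1) =
      (PySem.List.min? ((pvOdds xs).map (fun p => p.1)) (fun x => x), pvAns (pvOdds xs)) := by
  induction xs using List.reverseRecOn with
  | nil =>
      simp [PySem.List.enumerate_nil, pvOdds, pvAns, PySem.List.min?]
  | append_singleton xs x ih =>
      rw [PySem.List.enumerate_append, List.foldl_append, ih]
      rw [pvOdds_append]
      by_cases hodd : x % 2 ≠ 0
      · simp only [if_pos hodd, List.map_append, List.map_cons, List.map_nil]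
        simp only [PySem.List.enumerate_cons, PySem.List.enumerate_nil, List.foldl_cons,
          List.foldl_nil, zero_add]
        rw [pv_min?_append_singleton]
        simp only [pvStep, if_pos hodd]
        cases hmin : PySem.List.min? ((pvOdds xs).map (fun p => p.1)) (fun x => x) with
        | none =>
            have hnil : pvOdds xs = [] := by
              have := (PySem.List.min?_eq_none_iff (xs := (pvOdds xs).map (fun p => p.1))
                (key := fun x => x)).1 hmin
              simpa using this
            simp [pvAns, hnil, PySem.List.min?_id_cons, PySem.List.max?_id_cons]
        | some m =>
            by_cases hle : x ≤ m
            · have hminmx : min m x = x := min_eq_right hle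
              simp only [if_pos hle, hminmx]
              unfold pvAns
              simp only [List.map_append, List.map_cons, List.map_nil, List.filter_append]
              rw [pv_min?_append_singleton, hmin]
              simp only [hminmx]
              have hfx : List.filter (fun p => p.1 == x) [((x : Int), (xs.length : Int))]
                  = [((x : Int), (xs.length : Int))] := by simp
              rw [hfx]
              simp only [List.map_cons, List.map_nil]
              rw [pv_max?_append_singleton]
              cases hmax : PySem.List.max? (((pvOdds xs).filter (fun p => p.1 == x)).map
                  (fun p => p.2)) (fun x => x) with
              | none => simp
              | some M =>
                  have hM : M ∈ ((pvOdds xs).filter (fun p => p.1 == x)).map (fun p => p.2) :=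
                    PySem.List.max?_mem hmax
                  have hMlt : M < (xs.length : Int) := by
                    simp only [List.mem_map, List.mem_filter] at hM
                    obtain ⟨q, ⟨hq, _⟩, rfl⟩ := hM
                    exact pvOdds_index_lt xs q hq
                  simp [max_eq_right hMlt.le]
            · have hlt : m < x := lt_of_not_ge hle
              have hminmx : min m x = m := min_eq_left hlt.le
              simp only [if_neg hle, hminmx]
              unfold pvAns
              simp only [List.map_append, List.map_cons, List.map_nil, List.filter_append]
              rw [pv_min?_append_singleton, hmin]
              simp only [hminmx]
              have hbm : ((x : Int) == m) = false := by simpa using hlt.ne'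
              have hfx : List.filter (fun p => p.1 == m) [((x : Int), (xs.length : Int))] = [] := by
                simp [List.filter, hbm]
              rw [hfx]
              simp only [List.map_nil, List.append_nil]
      · simp only [if_neg hodd, List.append_nil]
        simp only [PySem.List.enumerate_cons, PySem.List.enumerate_nil, List.foldl_cons,
          List.foldl_nil, zero_add]
        simp [pvStep, hodd]

theorem pvOdds_isEmpty_iff (xs : List Int) :
    (pvOdds xs).isEmpty = true ↔
      PySem.List.min? ((pvOdds xs).map (fun p => p.1)) (fun x => x) = none := by
  rw [PySem.List.min?_eq_none_iff]
  simp [List.isEmpty_iff]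

-- ===== VERDICT (by name: the statement is the Claim_ definition above) =====
theorem min_odd_spec : Claim_equal_min_odd := by
  intro a _ _
  unfold Spec_min_odd min_odd min_odd_alt
  have hfold := pv_fold_char a
  simp only [show (fun (st : Option Int × Int) (p : Int × Int) =>
      if p.2 % 2 ≠ 0 then
        match st.1 with
        | none => (some p.2, p.1)
        | some c => if p.2 ≤ c then (some p.2, p.1) else st
      else st) = pvStep from rfl] at *
  rw [hfold]
  show (match PySem.List.min? ((pvOdds a).map (fun p => p.1)) (fun x => x) with
        | some _ => pvAns (pvOdds a)
        | none => -1) = _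
  by_cases hemp : (pvOdds a).isEmpty
  · rw [(pvOdds_isEmpty_iff a).1 hemp]
    simp only [pvOdds] at hemp
    simp [hemp]
  · have hne := hemp
    rw [pvOdds_isEmpty_iff] at hne
    cases hmin : PySem.List.min? ((pvOdds a).map (fun p => p.1)) (fun x => x) with
    | none => exact absurd hmin hne
    | some m =>
        show pvAns (pvOdds a) = _
        unfold pvAns
        rw [hmin]
        simp only [pvOdds] at hemp hmin ⊢
        simp only [List.map_map] at hmin ⊢
        simp [hemp, hmin]
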